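-- pv_equiv track=rewrite | github.com/rd8r8bkd9m-tech/os-main-8 | scripts/resolve_conflicts.py | _najti_marker
-- ===== SOURCE A (Python) =====
-- from typing import (
--     Callable,
--     Dict,
--     Iterable,
--     List,
--     Literal,
--     Optional,
--     Sequence,
--     Tuple,
--     TypedDict,
--     cast,
-- )
--
-- KONFLIKT_START = "<<<<<<<"
--
-- KONFLIKT_DELIM = "======="
--
-- KONFLIKT_END = ">>>>>>>"
--
-- def _najti_marker(stroka: str) -> Tuple[int, Optional[str]]:
--     """Ищет ближайший конфликтный маркер в строке."""
--
--     luchshij_indeks = len(stroka)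
--     vybrannyj_marker: Optional[str] = None
--     for marker in (KONFLIKT_START, KONFLIKT_DELIM, KONFLIKT_END):
--         indeks = stroka.find(marker)
--         if indeks != -1 and indeks < luchshij_indeks:
--             luchshij_indeks = indeks
--             vybrannyj_marker = marker
--     if vybrannyj_marker is None:
--         return -1, None
--     return luchshij_indeks, vybrannyj_marker
-- ===== SOURCE B (Python) =====
-- from typing import Optional, Tuple
--
-- KONFLIKT_START = "<<<<<<<"
--
-- KONFLIKT_DELIM = "======="
--
-- KONFLIKT_END = ">>>>>>>"
--
-- def _najti_marker(stroka: str) -> Tuple[int, Optional[str]]: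
--     """Single left-to-right scan with early exit instead of three full find() passes."""
--     for i in range(len(stroka)):
--         if stroka.startswith(KONFLIKT_START, i):
--             return i, KONFLIKT_START
--         if stroka.startswith(KONFLIKT_DELIM, i):
--             return i, KONFLIKT_DELIM
--         if stroka.startswith(KONFLIKT_END, i):
--             return i, KONFLIKT_END
--     return -1, None
-- ===== Notes on version B (the rewrite author's own statement) =====
-- stated objective: alternative
-- what changed: Replaced three independent full str.find scans followed by a min-selection with a single left-to-right scan that tests all three markers at each position and returns at the first hit.
import Mathlib
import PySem

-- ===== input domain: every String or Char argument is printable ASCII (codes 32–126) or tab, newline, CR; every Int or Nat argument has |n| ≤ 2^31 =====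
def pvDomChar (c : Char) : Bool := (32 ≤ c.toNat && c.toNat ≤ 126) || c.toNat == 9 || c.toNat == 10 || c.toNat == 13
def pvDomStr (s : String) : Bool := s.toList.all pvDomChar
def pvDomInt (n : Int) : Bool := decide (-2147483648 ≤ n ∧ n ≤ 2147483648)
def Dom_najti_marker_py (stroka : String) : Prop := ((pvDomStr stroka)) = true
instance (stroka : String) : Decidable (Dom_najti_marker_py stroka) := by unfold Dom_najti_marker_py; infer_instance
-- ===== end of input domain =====

-- B replaces A's three full str.find passes + min-selection by a single left-to-right scan
-- with early exit (alternative algorithm, same asymptotic cost).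

def KONFLIKT_START : String := "<<<<<<<"
def KONFLIKT_DELIM : String := "======="
def KONFLIKT_END : String := ">>>>>>>"

-- ===== PORT A =====
-- loop body of A's 'for marker in (…)' loop
def najtiStep (stroka : String) (st : Int × Option String) (marker : String) : Int × Option String :=
  let indeks := PySem.Str.find stroka marker
  if indeks ≠ -1 ∧ indeks < st.1 then (indeks, some marker) else st

def najti_marker_py (stroka : String) : Int × Option String :=
  let r := List.foldl (najtiStep stroka) (PySem.Str.len stroka, none)
      [KONFLIKT_START, KONFLIKT_DELIM, KONFLIKT_END]
  match r.2 with
  | none => (-1, none)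
  | some m => (r.1, some m)

-- ===== PORT B =====
-- B's 'for i in range(len(stroka))' scan; 'stroka.startswith(m, i)' is exactly
-- 'm.toList.isPrefixOf (suffix from i)'
def najtiScanB : List Char → Nat → Int × Option String
  | [], _ => (-1, none)
  | c :: rest, i =>
    if KONFLIKT_START.toList.isPrefixOf (c :: rest) then ((i : Int), some KONFLIKT_START)
    else if KONFLIKT_DELIM.toList.isPrefixOf (c :: rest) then ((i : Int), some KONFLIKT_DELIM)
    else if KONFLIKT_END.toList.isPrefixOf (c :: rest) then ((i : Int), some KONFLIKT_END)
    else najtiScanB rest (i + 1)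

def najti_marker_py_alt (stroka : String) : Int × Option String :=
  najtiScanB stroka.toList 0

-- ===== PRECONDITION & SPEC =====
def Spec_najti_marker_py (stroka : String) (out : Int × Option String) : Prop := out = najti_marker_py_alt stroka
instance (stroka : String) (out : Int × Option String) : Decidable (Spec_najti_marker_py stroka out) := by unfold Spec_najti_marker_py; infer_instance

-- ===== CLAIM (what is proved, stated in full; the proofs are below) =====
def Claim_equal_najti_marker_py : Prop := ∀ (stroka : String), Dom_najti_marker_py stroka → Spec_najti_marker_py stroka (najti_marker_py stroka)

-- ===== LEMMAS AND PROOFS =====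

-- first index at which one of the three markers starts, if any
def pvHit : List Char → Option Nat
  | [] => none
  | c :: rest =>
    if KONFLIKT_START.toList <+: (c :: rest) ∨ KONFLIKT_DELIM.toList <+: (c :: rest) ∨
        KONFLIKT_END.toList <+: (c :: rest) then some 0
    else (pvHit rest).map (· + 1)

-- the marker starting at a hit position (first in A's tuple order)
def pvPick (d : List Char) : String :=
  if KONFLIKT_START.toList <+: d then KONFLIKT_START
  else if KONFLIKT_DELIM.toList <+: d then KONFLIKT_DELIM
  else KONFLIKT_END

lemma pvScan_eq (l : List Char) : ∀ i : Nat, najtiScanB l i =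
    match pvHit l with
    | none => (-1, none)
    | some j => (((i + j : Nat) : Int), some (pvPick (l.drop j))) := by
  induction l with
  | nil => intro i; simp [najtiScanB, pvHit]
  | cons c rest ih =>
    intro i
    by_cases h1 : KONFLIKT_START.toList <+: (c :: rest)
    · simp [najtiScanB, pvHit, pvPick, h1, List.isPrefixOf_iff_prefix]
    · by_cases h2 : KONFLIKT_DELIM.toList <+: (c :: rest)
      · simp [najtiScanB, pvHit, pvPick, h1, h2, List.isPrefixOf_iff_prefix]
      · by_cases h3 : KONFLIKT_END.toList <+: (c :: rest)
        · simp [najtiScanB, pvHit, pvPick, h1, h2, h3, List.isPrefixOf_iff_prefix]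
        · rw [show najtiScanB (c :: rest) i = najtiScanB rest (i + 1) by
            simp [najtiScanB, List.isPrefixOf_iff_prefix, h1, h2, h3]]
          rw [ih (i + 1)]
          rw [show pvHit (c :: rest) = (pvHit rest).map (· + 1) by
            simp [pvHit, h1, h2, h3]]
          cases hr : pvHit rest with
          | none => simp
          | some j =>
            simp only [Option.map_some, List.drop_succ_cons]
            congr 1
            omega

lemma pvHit_none {l : List Char} (h : pvHit l = none) (j : Nat) :
    ¬ KONFLIKT_START.toList <+: l.drop j ∧ ¬ KONFLIKT_DELIM.toList <+: l.drop j ∧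
      ¬ KONFLIKT_END.toList <+: l.drop j := by
  induction l generalizing j with
  | nil => simp [KONFLIKT_START, KONFLIKT_DELIM, KONFLIKT_END]
  | cons c rest ih =>
    unfold pvHit at h
    split at h
    · exact absurd h (by simp)
    · rename_i hcond
      push Not at hcond
      cases j with
      | zero => simpa using hcond
      | succ j' =>
        have hr : pvHit rest = none := by
          cases hr : pvHit rest <;> simp [hr] at h ⊢
        simpa [List.drop_succ_cons] using ih hr j'

lemma pvHit_some {l : List Char} {j : Nat} (h : pvHit l = some j) :
    (KONFLIKT_START.toList <+: l.drop j ∨ KONFLIKT_DELIM.toList <+: l.drop j ∨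
      KONFLIKT_END.toList <+: l.drop j) ∧
    ∀ j' < j, ¬ KONFLIKT_START.toList <+: l.drop j' ∧ ¬ KONFLIKT_DELIM.toList <+: l.drop j' ∧
      ¬ KONFLIKT_END.toList <+: l.drop j' := by
  induction l generalizing j with
  | nil => simp [pvHit] at h
  | cons c rest ih =>
    unfold pvHit at h
    split at h
    · rename_i hcond
      have hj : j = 0 := by simpa using h.symm
      subst hj
      exact ⟨by simpa using hcond, by omega⟩
    · rename_i hcond
      push Not at hcond
      cases hr : pvHit rest with
      | none => simp [hr] at h
      | some j0 =>
        have hj : j = j0 + 1 := by simp [hr] at h; omega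
        subst hj
        obtain ⟨hor, hmin⟩ := ih hr
        refine ⟨by simpa [List.drop_succ_cons] using hor, ?_⟩
        intro j' hj'
        cases j' with
        | zero => simpa using hcond
        | succ j'' => simpa [List.drop_succ_cons] using hmin j'' (by omega)

lemma pvFindNone (l M : List Char) (h : ∀ j, ¬ M <+: l.drop j) :
    PySem.Chars.find l M = -1 := by
  rw [PySem.Chars.find_eq_neg_one_iff]
  intro hinf
  obtain ⟨j, hj⟩ := (PySem.Chars.exists_prefix_drop_iff_isIn M l).mpr
    ((PySem.Chars.isIn_iff_infix M l).mpr hinf)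
  exact h j hj

lemma pvFindPos (l M : List Char) {j : Nat} (hj : M <+: l.drop j) :
    0 ≤ PySem.Chars.find l M := by
  have hne : PySem.Chars.find l M ≠ -1 := by
    intro he
    exact (PySem.Chars.find_eq_neg_one_iff l M).mp he
      ((PySem.Chars.isIn_iff_infix M l).mp
        ((PySem.Chars.exists_prefix_drop_iff_isIn M l).mp ⟨j, hj⟩))
  have := PySem.Chars.neg_one_le_find l M
  omega

lemma pvLtLen {l M : List Char} {j : Nat} (hM : M ≠ []) (h : M <+: l.drop j) :
    j < l.length := by
  have h1 := h.length_le
  have h2 : 0 < M.length := List.length_pos_of_ne_nil hM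
  simp [List.length_drop] at h1
  omega

-- per-marker dichotomy at the first hit position j
lemma pvFindCases (l M : List Char) (hM : M ≠ []) (j : Nat)
    (hmin : ∀ j' < j, ¬ M <+: l.drop j') :
    (M <+: l.drop j ∧ PySem.Chars.find l M = (j : Int)) ∨
    (¬ M <+: l.drop j ∧ (PySem.Chars.find l M = -1 ∨
      ((j : Int) < PySem.Chars.find l M ∧ PySem.Chars.find l M < (l.length : Int)))) := by
  by_cases h : M <+: l.drop j
  · left
    refine ⟨h, ?_⟩
    have hpos := pvFindPos l M h
    obtain ⟨hpre, hlt⟩ := PySem.Chars.find_spec hpos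
    have h1 : ¬ (PySem.Chars.find l M).toNat < j := fun h' => hmin _ h' hpre
    have h2 : ¬ j < (PySem.Chars.find l M).toNat := fun h' => hlt j h' h
    omega
  · right
    refine ⟨h, ?_⟩
    by_cases hin : ∃ j', M <+: l.drop j'
    · obtain ⟨j', hj'⟩ := hin
      have hpos := pvFindPos l M hj'
      obtain ⟨hpre, hlt⟩ := PySem.Chars.find_spec hpos
      right
      have hge : ¬ (PySem.Chars.find l M).toNat < j := fun h' => hmin _ h' hpre
      have hne : (PySem.Chars.find l M).toNat ≠ j := fun he => h (he ▸ hpre)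
      have hlen : (PySem.Chars.find l M).toNat < l.length := pvLtLen hM hpre
      omega
    · push Not at hin
      exact Or.inl (pvFindNone l M hin)

-- ===== VERDICT (by name: the statement is the Claim_ definition above) =====
set_option maxHeartbeats 1000000 in
theorem najti_marker_py_spec : Claim_equal_najti_marker_py := by
  unfold Claim_equal_najti_marker_py Spec_najti_marker_py
  intro s _
  rw [najti_marker_py_alt, pvScan_eq s.toList 0]
  simp only [najti_marker_py, List.foldl_cons, List.foldl_nil, najtiStep,
    PySem.Str.find_eq, PySem.Str.len_eq]
  cases hhit : pvHit s.toList with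
  | none =>
    have h := pvHit_none hhit
    have e1 := pvFindNone s.toList KONFLIKT_START.toList (fun j => (h j).1)
    have e2 := pvFindNone s.toList KONFLIKT_DELIM.toList (fun j => (h j).2.1)
    have e3 := pvFindNone s.toList KONFLIKT_END.toList (fun j => (h j).2.2)
    simp [e1, e2, e3]
  | some j =>
    obtain ⟨hor, hmin⟩ := pvHit_some hhit
    have hjlen : j < s.toList.length := by
      rcases hor with h | h | h
      · exact pvLtLen (by decide) h
      · exact pvLtLen (by decide) h
      · exact pvLtLen (by decide) h
    have d1 := pvFindCases s.toList KONFLIKT_START.toList (by decide) j (fun j' h' => (hmin j' h').1)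
    have d2 := pvFindCases s.toList KONFLIKT_DELIM.toList (by decide) j (fun j' h' => (hmin j' h').2.1)
    have d3 := pvFindCases s.toList KONFLIKT_END.toList (by decide) j (fun j' h' => (hmin j' h').2.2)
    generalize hf1 : PySem.Chars.find s.toList KONFLIKT_START.toList = f1 at d1 ⊢
    generalize hf2 : PySem.Chars.find s.toList KONFLIKT_DELIM.toList = f2 at d2 ⊢
    generalize hf3 : PySem.Chars.find s.toList KONFLIKT_END.toList = f3 at d3 ⊢
    rcases d1 with ⟨p1, e1⟩ | ⟨n1, e1 | ⟨g1, L1⟩⟩ <;>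
      rcases d2 with ⟨p2, e2⟩ | ⟨n2, e2 | ⟨g2, L2⟩⟩ <;>
      rcases d3 with ⟨p3, e3⟩ | ⟨n3, e3 | ⟨g3, L3⟩⟩ <;>
      (try subst e1) <;> (try subst e2) <;> (try subst e3) <;>
      simp only [pvPick] <;>
      split_ifs <;>
      simp_all <;>
      omega
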